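-- pv_equiv track=rewrite | github.com/znspdlf15/individual_algorithm | kakao/2019/candidate_key.py | isUniqueRelation
-- ===== SOURCE A (Python) =====
-- def isUniqueRelation(relation, idxs):
--     dic = {}
--
--     for i in range(0, len(relation)):
--         key_str = ""
--         for x in idxs:
--             key_str += relation[i][x]
--
--         if dic.get(key_str) is not None:
--             return False
--
--         dic[key_str] = True
--
--     return True
-- ===== SOURCE B (Python) =====
-- def isUniqueRelation(relation, idxs):
--     keys = sorted("".join(row[x] for x in idxs) for row in relation)
--     return all(a != b for a, b in zip(keys, keys[1:]))
-- ===== Notes on version B (the rewrite author's own statement) =====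
-- stated objective: alternative
-- what changed: B replaces A's hash-based incremental scan (a dict of seen keys with an early return on the first collision) by a sort-then-scan algorithm: it builds all concatenated row keys, sorts them, and checks that no two adjacent sorted keys are equal.
-- outside the precondition, e.g. on isUniqueRelation([['a', 'b'], ['a', 'b'], ['c']], [1]): A returns False, B raises IndexError
import Mathlib
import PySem

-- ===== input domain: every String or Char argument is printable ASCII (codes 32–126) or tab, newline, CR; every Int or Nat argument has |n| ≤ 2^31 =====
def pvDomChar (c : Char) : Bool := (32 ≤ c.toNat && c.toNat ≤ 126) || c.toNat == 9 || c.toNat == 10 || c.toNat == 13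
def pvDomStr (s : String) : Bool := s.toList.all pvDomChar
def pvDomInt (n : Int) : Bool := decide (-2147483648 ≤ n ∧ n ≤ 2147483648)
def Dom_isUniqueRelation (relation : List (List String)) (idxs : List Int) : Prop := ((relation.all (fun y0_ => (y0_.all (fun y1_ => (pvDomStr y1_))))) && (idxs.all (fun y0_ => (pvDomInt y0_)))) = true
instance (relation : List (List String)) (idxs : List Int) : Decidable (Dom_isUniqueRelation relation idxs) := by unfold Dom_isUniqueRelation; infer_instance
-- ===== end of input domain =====

-- B replaces A's hash-based incremental collision scan by sort-then-adjacent-scan (objective: alternative).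

-- ===== PORT A =====
-- key_str = "" ; for x in idxs: key_str += relation[i][x]
-- (pyGetD is exact here because Pre_ puts every index in range)
def pvKeyA (row : List String) (idxs : List Int) : String :=
  idxs.foldl (fun s x => s ++ PySem.List.pyGetD row x "") ""

-- the 'for i in range(0, len(relation))' loop with early return False; under Pre_,
-- relation[i] for i = 0,…,len-1 is exactly a structural traversal of the rows.
def pvLoopA (idxs : List Int) (rows : List (List String)) (dic : PySem.Dict String Bool) : Bool :=
  match rows with
  | [] => true
  | r :: rest =>
    let keyStr := pvKeyA r idxs
    if (dic.get? keyStr).isSome then false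
    else pvLoopA idxs rest (dic.insert keyStr true)

def isUniqueRelation (relation : List (List String)) (idxs : List Int) : Bool :=
  pvLoopA idxs relation PySem.Dict.empty

-- ===== PORT B =====
-- keys = sorted("".join(row[x] for x in idxs) for row in relation)
-- return all(a != b for a, b in zip(keys, keys[1:]))
def isUniqueRelation_alt (relation : List (List String)) (idxs : List Int) : Bool :=
  let keys := PySem.List.sorted
    (relation.map (fun row => String.join (idxs.map (fun x => PySem.List.pyGetD row x ""))))
    (fun s => s) false
  (keys.zip (keys.drop 1)).all (fun p => p.1 != p.2)

-- ===== PRECONDITION & SPEC =====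
-- Pre_ excludes the inputs where some index of idxs is out of range for some row: B builds the
-- key of every row up front and raises IndexError there, while A, scanning incrementally, raises
-- on most of them but still returns False when a duplicate key occurs before the first bad row.
def Pre_isUniqueRelation (relation : List (List String)) (idxs : List Int) : Prop :=
  ∀ r ∈ relation, ∀ x ∈ idxs, PySem.Raise.InRange r.length x
instance (relation : List (List String)) (idxs : List Int) : Decidable (Pre_isUniqueRelation relation idxs) := by unfold Pre_isUniqueRelation; infer_instance

def pvWitness_isUniqueRelation : List (List String) × List Int := ([["a", "b"], ["b", "a"]], [0, 1])

def Spec_isUniqueRelation (relation : List (List String)) (idxs : List Int) (out : Bool) : Prop := out = isUniqueRelation_alt relation idxs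
instance (relation : List (List String)) (idxs : List Int) (out : Bool) : Decidable (Spec_isUniqueRelation relation idxs out) := by unfold Spec_isUniqueRelation; infer_instance

-- ===== CLAIM (what is proved, stated in full; the proofs are below) =====
def Claim_equal_isUniqueRelation : Prop := ∀ (relation : List (List String)) (idxs : List Int), Dom_isUniqueRelation relation idxs → Pre_isUniqueRelation relation idxs → Spec_isUniqueRelation relation idxs (isUniqueRelation relation idxs)

-- ===== LEMMAS AND PROOFS =====

-- A's += key construction equals B's "".join
theorem pvKeyA_eq_join (row : List String) (idxs : List Int) :
    pvKeyA row idxs = String.join (idxs.map (fun x => PySem.List.pyGetD row x "")) := by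
  simp [pvKeyA, String.join, List.foldl_map]

-- A's loop succeeds iff the keys of the remaining rows are distinct and none is already in dic
theorem pvLoopA_true_iff (idxs : List Int) (rows : List (List String)) (dic : PySem.Dict String Bool) :
    pvLoopA idxs rows dic = true ↔
      (rows.map (fun r => pvKeyA r idxs)).Nodup ∧
      ∀ k ∈ rows.map (fun r => pvKeyA r idxs), dic.get? k = none := by
  induction rows generalizing dic with
  | nil => simp [pvLoopA]
  | cons r rest ih =>
    simp only [pvLoopA, List.map_cons, List.nodup_cons, List.mem_cons]
    cases hg : dic.get? (pvKeyA r idxs) with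
    | some v =>
      simp only [Option.isSome_some, if_true]
      constructor
      · intro hf; simp at hf
      · rintro ⟨_, hall⟩
        have h0 := hall (pvKeyA r idxs) (Or.inl rfl)
        rw [hg] at h0; simp at h0
    | none =>
      simp only [Option.isSome_none, Bool.false_eq_true, if_false, ih]
      constructor
      · rintro ⟨hnd, hall⟩
        refine ⟨⟨?_, hnd⟩, ?_⟩
        · intro hmem
          have := hall _ hmem
          rw [PySem.Dict.get?_insert] at this
          simp at this
        · rintro k (rfl | hk)
          · exact hg
          · have := hall k hk
            rw [PySem.Dict.get?_insert] at this
            split at this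
            · cases this
            · exact this
      · rintro ⟨⟨hnotmem, hnd⟩, hall⟩
        refine ⟨hnd, ?_⟩
        intro k hk
        rw [PySem.Dict.get?_insert]
        split
        · next heq => exact absurd (heq ▸ hk) hnotmem
        · exact hall k (Or.inr hk)

-- on a weakly increasing list, 'no two adjacent elements equal' is exactly Nodup
theorem pvAdjacent_ne_iff_nodup (l : List String) (h : l.Pairwise (· ≤ ·)) :
    ((l.zip (l.drop 1)).all (fun p => p.1 != p.2) = true) ↔ l.Nodup := by
  induction l with
  | nil => simp
  | cons a t ih =>
    cases t with
    | nil => simp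
    | cons b t' =>
      rw [List.pairwise_cons] at h
      obtain ⟨hab, ht⟩ := h
      have hrec := ih ht
      simp only [List.drop_succ_cons, List.drop_zero, List.zip_cons_cons, List.all_cons,
        Bool.and_eq_true, bne_iff_ne, ne_eq, List.nodup_cons, List.mem_cons] at *
      constructor
      · rintro ⟨hne, hrest⟩
        refine ⟨?_, hrec.mp hrest⟩
        rintro (rfl | hmem)
        · exact hne rfl
        · have h1 : a ≤ b := hab b (Or.inl rfl)
          have hlt : a < b := lt_of_le_of_ne h1 hne
          have h2 : b ≤ a := by
            rcases List.pairwise_cons.mp ht with ⟨hb, _⟩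
            exact hb a hmem
          exact absurd hlt (not_lt.mpr h2)
      · rintro ⟨hnm, hnd⟩
        exact ⟨fun hEq => hnm (Or.inl hEq), hrec.mpr hnd⟩

-- ===== VERDICT (by name: the statement is the Claim_ definition above) =====
theorem isUniqueRelation_spec : Claim_equal_isUniqueRelation := by
  intro relation idxs _ _
  unfold Spec_isUniqueRelation isUniqueRelation isUniqueRelation_alt
  simp only [← pvKeyA_eq_join]
  set keys0 := relation.map (fun r => pvKeyA r idxs) with hkeys0
  set keys := PySem.List.sorted keys0 (fun s => s) false with hkeys
  have hperm : keys.Perm keys0 := PySem.List.sorted_perm keys0 (fun s => s) false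
  have hpw : keys.Pairwise (· ≤ ·) := PySem.List.sorted_pairwise keys0 (fun s => s)
  rw [Bool.eq_iff_iff, pvLoopA_true_iff, pvAdjacent_ne_iff_nodup keys hpw, hperm.nodup_iff]
  constructor
  · rintro ⟨hnd, _⟩; exact hnd
  · intro hnd
    exact ⟨hnd, fun k _ => PySem.Dict.get?_empty k⟩
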